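-- pv_equiv track=rewrite | github.com/ike20013/PhraseTools | main_merged_qt5.py | filter_by_stop_words
-- ===== SOURCE A (Python) =====
-- from typing import List, Dict, Set, Optional, Tuple
--
-- def filter_by_stop_words(phrases: List[Tuple[str, int]], stop_words: Set[str]) -> List[Tuple[str, int]]:
--     """Фильтрация по стоп-словам"""
--     if not stop_words:
--         return phrases
--
--     result = []
--     for phrase, freq in phrases:
--         phrase_lower = phrase.lower()
--         if not any(stop.lower() in phrase_lower for stop in stop_words):
--             result.append((phrase, freq))
--     return result
-- ===== SOURCE B (Python) =====
-- def filter_by_stop_words(phrases, stop_words):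
--     """Keep phrases whose lowercased text contains no stop word.
--
--     Set-lookup formulation: put the lowercased stop words in a hash set,
--     collect their distinct lengths, and test each slice of the lowercased
--     phrase (one per start position and length) against the set; a phrase
--     contains a stop word iff one of those slices is in the set."""
--     lows = {w.lower() for w in stop_words}
--     lens = {len(w) for w in lows}
--     result = []
--     for phrase, freq in phrases:
--         pl = phrase.lower()
--         if not any(pl[i:i + k] in lows
--                    for i in range(len(pl) + 1) for k in lens):
--             result.append((phrase, freq))
--     return result
-- ===== Notes on version B (the rewrite author's own statement) =====
-- stated objective: alternative
-- what changed: A runs a substring search of every stop word (re-lowered each time) inside every phrase; B builds a hash set of the lowered stop words and their distinct lengths once and instead tests each slice of the lowered phrase against the set, replacing the per-stop-word substring searches by per-position set lookups.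
import Mathlib
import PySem

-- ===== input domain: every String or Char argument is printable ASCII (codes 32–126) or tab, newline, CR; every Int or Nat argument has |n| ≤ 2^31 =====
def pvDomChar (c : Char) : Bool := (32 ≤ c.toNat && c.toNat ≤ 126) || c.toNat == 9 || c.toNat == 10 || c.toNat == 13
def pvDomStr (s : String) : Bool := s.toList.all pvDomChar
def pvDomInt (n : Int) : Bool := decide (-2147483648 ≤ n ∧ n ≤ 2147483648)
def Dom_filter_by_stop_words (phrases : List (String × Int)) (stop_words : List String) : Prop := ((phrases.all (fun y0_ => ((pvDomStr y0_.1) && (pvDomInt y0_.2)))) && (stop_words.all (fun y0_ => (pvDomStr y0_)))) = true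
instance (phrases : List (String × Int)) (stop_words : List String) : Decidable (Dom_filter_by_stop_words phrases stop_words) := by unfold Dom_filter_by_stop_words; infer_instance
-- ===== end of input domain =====

-- B replaces A's per-stop-word substring search by a hash-set lookup: the lowered stop words and
-- their distinct lengths are collected once and each slice of the lowered phrase is tested against
-- the set (objective: alternative algorithm); same return value, proved equal.


-- ===== PORT A =====
def filter_by_stop_words (phrases : List (String × Int)) (stop_words : List String) : List (String × Int) :=
  -- `if not stop_words: return phrases`
  if stop_words = [] then phrases
  else
    -- result = []; for phrase, freq in phrases: …
    phrases.foldl (fun result p =>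
      let phrase_lower := PySem.Str.lower p.1
      if stop_words.any (fun stop => PySem.Str.isIn (PySem.Str.lower stop) phrase_lower)
      then result
      else result ++ [(p.1, p.2)]) []

-- ===== PORT B =====
def filter_by_stop_words_alt (phrases : List (String × Int)) (stop_words : List String) : List (String × Int) :=
  -- lows = {w.lower() for w in stop_words}; lens = {len(w) for w in lows}
  let lows : PySem.Set String := PySem.Set.ofList (stop_words.map (fun w => PySem.Str.lower w))
  let lens : PySem.Set Int := PySem.Set.ofList (lows.map (fun w => PySem.Str.len w))
  phrases.foldl (fun result p =>
    let pl := PySem.Str.lower p.1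
    -- any(pl[i:i+k] in lows for i in range(len(pl)+1) for k in lens)
    if (PySem.List.pyRange 0 (PySem.Str.len pl + 1) 1).any (fun i =>
         lens.any (fun k => PySem.Set.contains lows (PySem.Str.slice pl (some i) (some (i + k)))))
    then result
    else result ++ [(p.1, p.2)]) []

-- ===== PRECONDITION & SPEC =====
def Spec_filter_by_stop_words (phrases : List (String × Int)) (stop_words : List String) (out : List (String × Int)) : Prop := out = filter_by_stop_words_alt phrases stop_words
instance (phrases : List (String × Int)) (stop_words : List String) (out : List (String × Int)) : Decidable (Spec_filter_by_stop_words phrases stop_words out) := by unfold Spec_filter_by_stop_words; infer_instance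

-- ===== CLAIM (what is proved, stated in full; the proofs are below) =====
def Claim_equal_filter_by_stop_words : Prop := ∀ (phrases : List (String × Int)) (stop_words : List String), Dom_filter_by_stop_words phrases stop_words → Spec_filter_by_stop_words phrases stop_words (filter_by_stop_words phrases stop_words)


-- ===== LEMMAS AND PROOFS =====

-- `sub` is an infix of `pl` iff it is a prefix of some suffix `pl.drop j` with j ≤ length
theorem pv_infix_iff_bounded_drop (sub pl : List Char) :
    (sub <:+: pl) ↔ ∃ j < pl.length + 1, sub <+: pl.drop j := by
  constructor
  · intro h
    obtain ⟨j, hp⟩ := (PySem.Chars.exists_prefix_drop_iff_isIn sub pl).mpr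
      ((PySem.Chars.isIn_iff_infix sub pl).mpr h)
    by_cases hj : j ≤ pl.length
    · exact ⟨j, by omega, hp⟩
    · refine ⟨pl.length, by omega, ?_⟩
      have h1 : pl.drop j = [] := List.drop_eq_nil_of_le (by omega)
      have h2 : pl.drop pl.length = [] := List.drop_eq_nil_of_le (le_refl _)
      rw [h2]; rw [h1] at hp; exact hp
  · rintro ⟨j, _, hp⟩
    exact (PySem.Chars.isIn_iff_infix sub pl).mp
      ((PySem.Chars.exists_prefix_drop_iff_isIn sub pl).mp ⟨j, hp⟩)

-- B's per-phrase hit test (some slice of the lowered phrase is in the stop-word set)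
-- computes the same Boolean as A's (some stop word is a substring of the lowered phrase)
theorem pv_hit_eq (sw : List String) (s : String) :
    ((PySem.List.pyRange 0 (PySem.Str.len (PySem.Str.lower s) + 1) 1).any (fun i =>
       (PySem.Set.ofList ((PySem.Set.ofList (sw.map (fun w => PySem.Str.lower w))).map
           (fun w => PySem.Str.len w))).any (fun k =>
         PySem.Set.contains (PySem.Set.ofList (sw.map (fun w => PySem.Str.lower w)))
           (PySem.Str.slice (PySem.Str.lower s) (some i) (some (i + k))))))
    = sw.any (fun stop => PySem.Str.isIn (PySem.Str.lower stop) (PySem.Str.lower s)) := by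
  rw [Bool.eq_iff_iff]
  simp only [List.any_eq_true, PySem.Set.contains_iff, PySem.Set.mem_ofList, List.mem_map,
    PySem.List.mem_pyRange_one, PySem.Str.isIn_iff_infix]
  constructor
  · rintro ⟨i, ⟨hi0, _⟩, k, ⟨w', _, rfl⟩, stop, hmem, hslice⟩
    refine ⟨stop, hmem, ?_⟩
    rw [hslice, PySem.Str.toList_slice]
    have hi : i = ((i.toNat : Nat) : Int) := (Int.toNat_of_nonneg hi0).symm
    have hcs : PySem.Chars.slice (PySem.Str.lower s).toList (some i) (some (i + PySem.Str.len w'))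
        = PySem.List.slice (PySem.Str.lower s).toList (some i) (some (i + PySem.Str.len w')) := rfl
    rw [hcs, PySem.Str.len_eq, hi, PySem.List.slice_natCast_add]
    exact (List.take_prefix _ _).isInfix.trans (List.drop_suffix _ _).isInfix
  · rintro ⟨stop, hmem, hinf⟩
    obtain ⟨j, hj, hp⟩ := (pv_infix_iff_bounded_drop _ _).mp hinf
    refine ⟨(j : Int), ⟨by positivity, ?_⟩, PySem.Str.len (PySem.Str.lower stop),
      ⟨PySem.Str.lower stop, ⟨stop, hmem, rfl⟩, rfl⟩, stop, hmem, ?_⟩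
    · rw [PySem.Str.len_eq]; exact_mod_cast hj
    · refine (String.toList_inj.mp ?_).symm
      have hcs : PySem.Chars.slice (PySem.Str.lower s).toList (some (j : Int))
            (some ((j : Int) + PySem.Str.len (PySem.Str.lower stop)))
          = PySem.List.slice (PySem.Str.lower s).toList (some (j : Int))
            (some ((j : Int) + PySem.Str.len (PySem.Str.lower stop))) := rfl
      rw [PySem.Str.toList_slice, hcs, PySem.Str.len_eq, PySem.List.slice_natCast_add]
      exact (List.prefix_iff_eq_take.mp hp).symm

-- B's loop over an empty stop-word set appends every phrase
theorem pv_b_empty (l : List (String × Int)) (acc : List (String × Int)) :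
    l.foldl (fun result p =>
      if ((PySem.List.pyRange 0 (PySem.Str.len (PySem.Str.lower p.1) + 1) 1).any (fun i =>
           (PySem.Set.ofList ((PySem.Set.ofList ([] : List String)).map
               (fun w => PySem.Str.len w))).any (fun k =>
             PySem.Set.contains (PySem.Set.ofList ([] : List String))
               (PySem.Str.slice (PySem.Str.lower p.1) (some i) (some (i + k))))))
      then result
      else result ++ [(p.1, p.2)]) acc = acc ++ l := by
  induction l generalizing acc with
  | nil => simp
  | cons a t ih =>
      have hcond : ((PySem.List.pyRange 0 (PySem.Str.len (PySem.Str.lower a.1) + 1) 1).any (fun i =>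
          (PySem.Set.ofList ((PySem.Set.ofList ([] : List String)).map
              (fun w => PySem.Str.len w))).any (fun k =>
            PySem.Set.contains (PySem.Set.ofList ([] : List String))
              (PySem.Str.slice (PySem.Str.lower a.1) (some i) (some (i + k)))))) = false := by
        simp [PySem.Set.ofList]
      simp only [List.foldl_cons, hcond, Bool.false_eq_true, if_false]
      rw [ih]
      simp

-- ===== VERDICT (by name: the statement is the Claim_ definition above) =====
theorem filter_by_stop_words_spec : Claim_equal_filter_by_stop_words := by
  intro phrases sw _
  unfold Spec_filter_by_stop_words
  simp only [filter_by_stop_words, filter_by_stop_words_alt]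
  by_cases h : sw = []
  · subst h
    rw [if_pos rfl]
    simp only [List.map_nil]
    exact ((pv_b_empty phrases []).trans (by simp)).symm
  · rw [if_neg h]
    symm
    apply PySem.List.foldl_congr_mem
    intro acc p _
    simp only [pv_hit_eq sw p.1]
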